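-- pv_equiv track=rewrite | github.com/hiroto0227/crf-chemdner | scripts/featurize.py | convertSentenceToFeatures
-- ===== SOURCE A (Python) =====
-- def convertSentenceToFeatures(sentence):
--     def getNgram(array, n):
--         """targetとなる語は一番後ろ。
--         [w_(i-2), w_(i-1), 2_i]
--         """
--         ret_array = []
--         pagging_array = ['<B>'] * (n - 1) + array + ['<E>'] * (n - 1)
--         for i in range(len(pagging_array)):
--             ret_array.append(''.join(pagging_array[i:i + n]))
--         if n == 1:
--             return ret_array
--         else:
--             return ret_array[:-(n - 1)]
--
--     array = [c for c in sentence]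
--     g_1 = getNgram(array, 1)
--     g_2 = getNgram(array, 2)
--     g_3 = getNgram(array, 3)
--     g_4 = getNgram(array, 4)
--     g_5 = getNgram(array, 5)
--     return [{'1g': _1, '2g': _2, '3g': _3, '4g': _4, '5g': _5} for _1, _2, _3, _4, _5 in zip(g_1, g_2, g_3, g_4, g_5)]
-- ===== SOURCE B (Python) =====
-- def convertSentenceToFeatures(sentence):
--     padded = ['<B>'] * 4 + list(sentence)
--     features = []
--     for i in range(len(sentence)):
--         features.append({'1g': ''.join(padded[i + 4:i + 5]),
--                          '2g': ''.join(padded[i + 3:i + 5]),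
--                          '3g': ''.join(padded[i + 2:i + 5]),
--                          '4g': ''.join(padded[i + 1:i + 5]),
--                          '5g': ''.join(padded[i:i + 5])})
--     return features
-- ===== Notes on version B (the rewrite author's own statement) =====
-- stated objective: simpler
-- what changed: B replaces A's five separate column passes (one padded-and-trimmed n-gram list per n, then zip of the five lists) by a single row-wise pass over positions with one '<B>'-padded array, reading each n-gram directly as a slice ending at position i.
import Mathlib
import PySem

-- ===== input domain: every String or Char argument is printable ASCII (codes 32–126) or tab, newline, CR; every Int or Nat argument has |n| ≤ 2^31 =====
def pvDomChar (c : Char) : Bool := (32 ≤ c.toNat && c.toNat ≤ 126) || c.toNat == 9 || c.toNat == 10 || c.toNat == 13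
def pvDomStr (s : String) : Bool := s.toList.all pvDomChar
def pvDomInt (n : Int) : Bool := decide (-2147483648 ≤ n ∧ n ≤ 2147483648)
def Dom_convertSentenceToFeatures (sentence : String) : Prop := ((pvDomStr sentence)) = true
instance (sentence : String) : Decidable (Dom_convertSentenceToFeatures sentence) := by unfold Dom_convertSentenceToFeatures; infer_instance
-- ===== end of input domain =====

-- B builds the same per-position 1..5-gram feature rows in one pass over positions
-- with a single '<B>'-padded array, instead of A's five padded/trimmed column lists zipped together (objective: simpler).

-- ===== PORT A =====
-- inner helper getNgram(array, n) of A
def pvGetNgram (array : List String) (n : Nat) : List String :=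
  let pagging := List.replicate (n - 1) "<B>" ++ array ++ List.replicate (n - 1) "<E>"
  let ret := (List.range pagging.length).map
    (fun i : Nat => PySem.Str.join "" (PySem.List.slice pagging (some (i : Int)) (some ((i : Int) + (n : Int)))))
  if n = 1 then ret
  else PySem.List.slice ret none (some (-((n - 1 : Nat) : Int)))

def convertSentenceToFeatures (sentence : String) : List (List (String × String)) :=
  let array := sentence.toList.map (fun c => String.ofList [c])
  let g1 := pvGetNgram array 1
  let g2 := pvGetNgram array 2
  let g3 := pvGetNgram array 3
  let g4 := pvGetNgram array 4
  let g5 := pvGetNgram array 5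
  (List.zip g1 (List.zip g2 (List.zip g3 (List.zip g4 g5)))).map
    (fun x => [("1g", x.1), ("2g", x.2.1), ("3g", x.2.2.1), ("4g", x.2.2.2.1), ("5g", x.2.2.2.2)])

-- ===== PORT B =====
def convertSentenceToFeatures_alt (sentence : String) : List (List (String × String)) :=
  let padded := List.replicate 4 "<B>" ++ sentence.toList.map (fun c => String.ofList [c])
  (List.range sentence.toList.length).map (fun i =>
    [("1g", PySem.Str.join "" (PySem.List.slice padded (some ((i + 4 : Nat) : Int)) (some ((i + 5 : Nat) : Int)))),
     ("2g", PySem.Str.join "" (PySem.List.slice padded (some ((i + 3 : Nat) : Int)) (some ((i + 5 : Nat) : Int)))),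
     ("3g", PySem.Str.join "" (PySem.List.slice padded (some ((i + 2 : Nat) : Int)) (some ((i + 5 : Nat) : Int)))),
     ("4g", PySem.Str.join "" (PySem.List.slice padded (some ((i + 1 : Nat) : Int)) (some ((i + 5 : Nat) : Int)))),
     ("5g", PySem.Str.join "" (PySem.List.slice padded (some ((i : Nat) : Int)) (some ((i + 5 : Nat) : Int))))])

-- ===== PRECONDITION & SPEC =====
def Spec_convertSentenceToFeatures (sentence : String) (out : List (List (String × String))) : Prop := out = convertSentenceToFeatures_alt sentence
instance (sentence : String) (out : List (List (String × String))) : Decidable (Spec_convertSentenceToFeatures sentence out) := by unfold Spec_convertSentenceToFeatures; infer_instance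

-- ===== CLAIM (what is proved, stated in full; the proofs are below) =====
def Claim_equal_convertSentenceToFeatures : Prop := ∀ (sentence : String), Dom_convertSentenceToFeatures sentence → Spec_convertSentenceToFeatures sentence (convertSentenceToFeatures sentence)

-- ===== LEMMAS AND PROOFS =====

theorem pvGetNgram_len (arr : List String) (n : Nat) (h1 : 1 ≤ n) :
    (pvGetNgram arr n).length = arr.length + (n - 1) := by
  unfold pvGetNgram
  by_cases hn : n = 1
  · simp [hn]
  · have hk : 0 < n - 1 := by omega
    rw [if_neg hn, PySem.List.slice_to_neg_natCast _ _ hk]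
    simp

theorem pvGetNgram_get (arr : List String) (n i : Nat) (h1 : 1 ≤ n)
    (hi : i < arr.length + (n - 1)) (hlt : i < (pvGetNgram arr n).length) :
    (pvGetNgram arr n)[i] =
      PySem.Str.join ""
        (((List.replicate (n - 1) "<B>" ++ arr ++ List.replicate (n - 1) "<E>").drop i).take n) := by
  have hcast : ∀ j : Nat, ((j : Int) + (n : Int)) = (((j + n : Nat)) : Int) := by
    intro j; push_cast; ring
  rcases eq_or_ne n 1 with hn | hn
  · subst hn
    simp only [pvGetNgram, hcast, PySem.List.slice_natCast, Nat.add_sub_cancel_left]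
    simp
  · have hk : 0 < n - 1 := by omega
    simp only [pvGetNgram, if_neg hn, PySem.List.slice_to_neg_natCast _ _ hk,
      List.getElem_take, List.getElem_map, List.getElem_range, hcast,
      PySem.List.slice_natCast, Nat.add_sub_cancel_left]

theorem pv_idx (arr : List String) (n k : Nat) (h1 : 1 ≤ n) (h5 : n ≤ 5)
    (hk : k < arr.length + (n - 1)) :
    (List.replicate (n - 1) "<B>" ++ arr ++ List.replicate (n - 1) "<E>")[k]?
      = (List.replicate 4 "<B>" ++ arr)[k + 5 - n]? := by
  simp only [List.getElem?_append, List.length_append, List.length_replicate,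
    List.getElem?_replicate]
  split_ifs with a b c d e f g <;> first | rfl | omega | (congr 1; omega)

theorem pv_slice_eq (arr : List String) (n i : Nat) (h1 : 1 ≤ n) (h5 : n ≤ 5)
    (hi : i < arr.length) :
    ((List.replicate (n - 1) "<B>" ++ arr ++ List.replicate (n - 1) "<E>").drop i).take n
      = ((List.replicate 4 "<B>" ++ arr).drop (i + 5 - n)).take n := by
  apply List.ext_getElem?
  intro j
  by_cases hj : j < n
  · rw [List.getElem?_take_of_lt (by exact hj), List.getElem?_take_of_lt (by exact hj),
      List.getElem?_drop, List.getElem?_drop]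
    have := pv_idx arr n (i + j) h1 h5 (by omega)
    rw [this]
    congr 1
    omega
  · rw [List.getElem?_eq_none (by simp [List.length_take]; omega),
      List.getElem?_eq_none (by simp [List.length_take]; omega)]

theorem pv_main (arr : List String) :
    (List.zip (pvGetNgram arr 1) (List.zip (pvGetNgram arr 2)
        (List.zip (pvGetNgram arr 3) (List.zip (pvGetNgram arr 4) (pvGetNgram arr 5))))).map
      (fun x => [("1g", x.1), ("2g", x.2.1), ("3g", x.2.2.1), ("4g", x.2.2.2.1), ("5g", x.2.2.2.2)])
    = (List.range arr.length).map (fun i =>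
        [("1g", PySem.Str.join "" (PySem.List.slice (List.replicate 4 "<B>" ++ arr) (some ((i + 4 : Nat) : Int)) (some ((i + 5 : Nat) : Int)))),
         ("2g", PySem.Str.join "" (PySem.List.slice (List.replicate 4 "<B>" ++ arr) (some ((i + 3 : Nat) : Int)) (some ((i + 5 : Nat) : Int)))),
         ("3g", PySem.Str.join "" (PySem.List.slice (List.replicate 4 "<B>" ++ arr) (some ((i + 2 : Nat) : Int)) (some ((i + 5 : Nat) : Int)))),
         ("4g", PySem.Str.join "" (PySem.List.slice (List.replicate 4 "<B>" ++ arr) (some ((i + 1 : Nat) : Int)) (some ((i + 5 : Nat) : Int)))),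
         ("5g", PySem.Str.join "" (PySem.List.slice (List.replicate 4 "<B>" ++ arr) (some ((i : Nat) : Int)) (some ((i + 5 : Nat) : Int))))]) := by
  have hlen : ∀ m : Nat, 1 ≤ m → (pvGetNgram arr m).length = arr.length + (m - 1) :=
    fun m hm => pvGetNgram_len arr m hm
  apply List.ext_getElem
  · simp [List.length_zip, hlen 1 (by omega), hlen 2 (by omega), hlen 3 (by omega),
      hlen 4 (by omega), hlen 5 (by omega)]
  · intro i h1 h2
    have hiL : i < arr.length := by
      simpa using h2
    simp only [List.getElem_map, List.getElem_zip, List.getElem_range]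
    rw [pvGetNgram_get arr 1 i (by omega) (by omega) (by rw [hlen 1 (by omega)]; omega),
        pvGetNgram_get arr 2 i (by omega) (by omega) (by rw [hlen 2 (by omega)]; omega),
        pvGetNgram_get arr 3 i (by omega) (by omega) (by rw [hlen 3 (by omega)]; omega),
        pvGetNgram_get arr 4 i (by omega) (by omega) (by rw [hlen 4 (by omega)]; omega),
        pvGetNgram_get arr 5 i (by omega) (by omega) (by rw [hlen 5 (by omega)]; omega),
        pv_slice_eq arr 1 i (by omega) (by omega) hiL,
        pv_slice_eq arr 2 i (by omega) (by omega) hiL,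
        pv_slice_eq arr 3 i (by omega) (by omega) hiL,
        pv_slice_eq arr 4 i (by omega) (by omega) hiL,
        pv_slice_eq arr 5 i (by omega) (by omega) hiL]
    simp only [PySem.List.slice_natCast]
    norm_num
    refine ⟨?_, ?_, ?_, ?_⟩ <;> (congr 2 <;> omega)

-- ===== VERDICT (by name: the statement is the Claim_ definition above) =====
theorem convertSentenceToFeatures_spec : Claim_equal_convertSentenceToFeatures := by
  intro sentence _
  unfold Spec_convertSentenceToFeatures convertSentenceToFeatures convertSentenceToFeatures_alt
  have hmap : sentence.toList.length
      = (sentence.toList.map (fun c => String.ofList [c])).length := by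
    simp
  rw [hmap]
  exact pv_main (sentence.toList.map (fun c => String.ofList [c]))
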